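-- pv_equiv track=rewrite | github.com/sclark268626/SeniorProject-HETA-Lite | scripts/run_faithfulness_hotpot.py | selected_token_counts
-- ===== SOURCE A (Python) =====
-- from typing import Any, Dict, Iterable, List, Set, Tuple
--
-- def selected_token_counts(
--     segment_spans: Dict[str, List[int] | Tuple[int, int]], selected_indices: List[int]
-- ) -> Dict[str, int]:
--     selected = set(int(i) for i in selected_indices)
--     counts: Dict[str, int] = {}
--     for name in ("narrative", "evidence", "question"):
--         span = segment_spans.get(name, (0, 0))
--         if not isinstance(span, (list, tuple)) or len(span) < 2:
--             counts[name] = 0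
--             continue
--         start, end = int(span[0]), int(span[1])
--         lo = max(0, start)
--         hi = max(lo, int(end))
--         counts[name] = int(sum(1 for idx in range(lo, hi) if idx in selected))
--     return counts
-- ===== SOURCE B (Python) =====
-- def selected_token_counts(segment_spans, selected_indices):
--     srt = sorted(set(selected_indices))
--
--     def bl(x):
--         # bisect_left by hand (the bisect module is not imported by this file)
--         lo, hi = 0, len(srt)
--         while lo < hi:
--             mid = (lo + hi) // 2
--             if srt[mid] < x:
--                 lo = mid + 1
--             else:
--                 hi = mid
--         return lo
--
--     def span_count(span):
--         if not isinstance(span, (list, tuple)) or len(span) < 2: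
--             return 0
--         lo = max(0, int(span[0]))
--         hi = max(lo, int(span[1]))
--         return bl(hi) - bl(lo)
--
--     return {name: span_count(segment_spans.get(name, (0, 0)))
--             for name in ("narrative", "evidence", "question")}
-- ===== Notes on version B (the rewrite author's own statement) =====
-- stated objective: alternative
-- what changed: Instead of scanning every index of each segment's [lo,hi) range and testing membership in the selected set, B sorts the distinct selected indices once and counts each segment with two hand-written bisect_left binary searches (bl(hi)-bl(lo)), building the result as a dict comprehension.
import Mathlib
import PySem

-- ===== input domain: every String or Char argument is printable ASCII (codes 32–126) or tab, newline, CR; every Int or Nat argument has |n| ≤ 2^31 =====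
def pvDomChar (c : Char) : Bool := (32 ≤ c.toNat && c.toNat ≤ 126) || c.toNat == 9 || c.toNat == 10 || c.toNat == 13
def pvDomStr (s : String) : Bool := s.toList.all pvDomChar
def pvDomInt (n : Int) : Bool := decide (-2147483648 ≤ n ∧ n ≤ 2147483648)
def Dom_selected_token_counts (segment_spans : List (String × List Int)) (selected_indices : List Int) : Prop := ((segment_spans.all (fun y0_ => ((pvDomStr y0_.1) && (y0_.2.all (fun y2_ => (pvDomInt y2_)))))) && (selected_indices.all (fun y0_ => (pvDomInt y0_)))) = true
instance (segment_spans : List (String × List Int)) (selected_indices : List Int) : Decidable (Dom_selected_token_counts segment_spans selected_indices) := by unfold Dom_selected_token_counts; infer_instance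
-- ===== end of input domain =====

-- ===== PORT A =====
def selected_token_counts (segment_spans : List (String × List Int)) (selected_indices : List Int) : List (String × Int) :=
  let selected : PySem.Set Int := PySem.Set.ofList selected_indices
  let counts : PySem.Dict String Int := PySem.Dict.empty
  let counts := ["narrative", "evidence", "question"].foldl (fun (counts : PySem.Dict String Int) name =>
    let span := (PySem.Dict.mk segment_spans).getD name [0, 0]
    -- 'isinstance(span, (list, tuple))' is always true under the type convention
    if span.length < 2 then counts.insert name 0
    else
      let start := PySem.List.pyGetD span 0 0
      let end_ := PySem.List.pyGetD span 1 0
      let lo := max 0 start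
      let hi := max lo end_
      counts.insert name ((PySem.List.pyRange lo hi 1).foldl
        (fun acc idx => if PySem.Set.contains selected idx then acc + 1 else acc) 0)) counts
  counts.items

-- ===== PORT B =====
-- Source B's hand-written bl(x) is the standard bisect_left loop; PySem.List.bisectLeft is that
-- very loop (lo/hi, mid = (lo+hi)//2, srt[mid] < x) step for step, so it is used as its port.
def pvSpanCount (srt : List Int) (span : List Int) : Int :=
  if span.length < 2 then 0
  else
    let lo := max 0 (PySem.List.pyGetD span 0 0)
    let hi := max lo (PySem.List.pyGetD span 1 0)
    ((PySem.List.bisectLeft srt hi : Nat) : Int) - ((PySem.List.bisectLeft srt lo : Nat) : Int)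

def selected_token_counts_alt (segment_spans : List (String × List Int)) (selected_indices : List Int) : List (String × Int) :=
  let srt := PySem.List.sorted (PySem.Set.ofList selected_indices) (fun x => x)
  ["narrative", "evidence", "question"].map
    (fun name => (name, pvSpanCount srt ((PySem.Dict.mk segment_spans).getD name [0, 0])))

-- ===== PRECONDITION & SPEC =====
def Spec_selected_token_counts (segment_spans : List (String × List Int)) (selected_indices : List Int) (out : List (String × Int)) : Prop := out = selected_token_counts_alt segment_spans selected_indices
instance (segment_spans : List (String × List Int)) (selected_indices : List Int) (out : List (String × Int)) : Decidable (Spec_selected_token_counts segment_spans selected_indices out) := by unfold Spec_selected_token_counts; infer_instance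

-- ===== CLAIM (what is proved, stated in full; the proofs are below) =====
def Claim_equal_selected_token_counts : Prop := ∀ (segment_spans : List (String × List Int)) (selected_indices : List Int), Dom_selected_token_counts segment_spans selected_indices → Spec_selected_token_counts segment_spans selected_indices (selected_token_counts segment_spans selected_indices)

-- ===== LEMMAS AND PROOFS =====

-- Counting a range's members that lie in a nodup list equals counting the list's
-- members that lie in the range.
lemma pv_countP_range_eq (L : List Int) (hL : L.Nodup) (lo hi : Int) :
    (PySem.List.pyRange lo hi 1).countP (PySem.Set.contains L)
      = L.countP (fun v => decide (lo ≤ v) && decide (v < hi)) := by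
  have h1 : ((PySem.List.pyRange lo hi 1).filter (PySem.Set.contains L)).Perm
      (L.filter (fun v => decide (lo ≤ v) && decide (v < hi))) := by
    rw [List.perm_ext_iff_of_nodup ((PySem.List.nodup_pyRange_one lo hi).filter _) (hL.filter _)]
    intro a
    simp [List.mem_filter, PySem.List.mem_pyRange_one, PySem.Set.contains, and_comm]
  simpa [List.countP_eq_length_filter] using h1.length_eq

-- bisect_left on a strictly increasing list returns the number of elements below x.
lemma pv_bl_eq_countP (srt : List Int) (h : srt.Pairwise (· < ·)) (x : Int) :
    PySem.List.bisectLeft srt x = srt.countP (fun v => decide (v < x)) := by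
  obtain ⟨hle, hlt, hge⟩ := PySem.List.bisectLeft_spec srt x (h.imp le_of_lt)
  set r := PySem.List.bisectLeft srt x with hr
  have hsplit := (List.take_append_drop r srt).symm
  have htake : (srt.take r).countP (fun v => decide (v < x)) = r := by
    rw [List.countP_eq_length.mpr, List.length_take_of_le hle]
    intro a ha
    obtain ⟨j, hj, hja⟩ := List.getElem_of_mem ha
    have hjr : j < r := lt_of_lt_of_le hj (by simp [List.length_take])
    have hjl : j < srt.length := lt_of_lt_of_le hjr hle
    rw [List.getElem_take] at hja
    simpa [← hja] using hlt j hjl hjr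
  have hdrop : (srt.drop r).countP (fun v => decide (v < x)) = 0 := by
    rw [List.countP_eq_zero]
    intro a ha
    obtain ⟨j, hj, hja⟩ := List.getElem_of_mem ha
    rw [List.getElem_drop] at hja
    have hjl : r + j < srt.length := by
      have h2 := hj
      simp [List.length_drop] at h2
      omega
    have := hge (r + j) hjl (Nat.le_add_right r j)
    simp [← hja]
    omega
  conv_rhs => rw [hsplit]
  rw [List.countP_append, htake, hdrop]
  omega

-- countP of a half-open window as a difference of two prefix counts.
lemma pv_countP_split (l : List Int) (lo hi : Int) (h : lo ≤ hi) :
    l.countP (fun v => decide (v < hi))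
      = l.countP (fun v => decide (v < lo)) + l.countP (fun v => decide (lo ≤ v) && decide (v < hi)) := by
  induction l with
  | nil => simp
  | cons a t ih =>
    simp only [List.countP_cons, ih]
    by_cases h1 : a < lo
    · have h2 : a < hi := lt_of_lt_of_le h1 h
      have h3 : ¬ lo ≤ a := not_le.mpr h1
      simp [h1, h2, h3] <;> omega
    · have h3 : lo ≤ a := not_lt.mp h1
      by_cases h2 : a < hi <;> simp [h1, h2, h3] <;> omega

-- A's per-segment range scan equals B's two binary searches on sorted(set(si)).
lemma pv_seg_eq (si : List Int) (span : List Int) :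
    (if span.length < 2 then (0 : Int)
     else (PySem.List.pyRange (max 0 (PySem.List.pyGetD span 0 0))
            (max (max 0 (PySem.List.pyGetD span 0 0)) (PySem.List.pyGetD span 1 0)) 1).foldl
        (fun acc idx => if PySem.Set.contains (PySem.Set.ofList si) idx then acc + 1 else acc) 0)
      = pvSpanCount (PySem.List.sorted (PySem.Set.ofList si) (fun x => x)) span := by
  by_cases hsp : span.length < 2
  · simp [pvSpanCount, hsp]
  · simp only [pvSpanCount, hsp, if_false]
    rw [PySem.List.foldl_if_add_one ((PySem.Set.ofList si).contains),
      pv_countP_range_eq (PySem.Set.ofList si) (PySem.Set.nodup_ofList si)]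
    generalize hlo : max 0 (PySem.List.pyGetD span 0 0) = lo
    generalize hhi : max lo (PySem.List.pyGetD span 1 0) = hi
    have hlh : lo ≤ hi := hhi ▸ le_max_left lo _
    have hperm : (PySem.List.sorted (PySem.Set.ofList si) (fun x => x)).Perm
        (PySem.Set.ofList si) := PySem.List.sorted_perm _ _ _
    rw [pv_bl_eq_countP _ (PySem.List.sorted_ofList_pairwise_lt si) hi,
      pv_bl_eq_countP _ (PySem.List.sorted_ofList_pairwise_lt si) lo,
      hperm.countP_eq, hperm.countP_eq,
      pv_countP_split (PySem.Set.ofList si) lo hi hlh]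
    push_cast
    ring

-- items of the three concrete-key inserts A performs
lemma pv_items3 (a b c : Int) :
    ((((PySem.Dict.empty : PySem.Dict String Int).insert "narrative" a).insert
        "evidence" b).insert "question" c).items
      = [("narrative", a), ("evidence", b), ("question", c)] := by rfl

-- ===== VERDICT (by name: the statement is the Claim_ definition above) =====
theorem selected_token_counts_spec : Claim_equal_selected_token_counts := by
  intro ss si _
  show _ = _
  unfold selected_token_counts selected_token_counts_alt
  simp only [List.foldl, List.map]
  rw [← pv_seg_eq si, ← pv_seg_eq si, ← pv_seg_eq si]
  split_ifs <;> rw [pv_items3]
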